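-- pv_equiv track=rewrite | github.com/DongGyu123/practice | 자료구조/Dict/homework.py | cal_point
-- ===== SOURCE A (Python) =====
-- def cal_point(y_set, p_set, int_list):
--   """
--   >>> cal_point({1, 2, 3}, {4, 5, 6}, [1, 2, 3, 4, 5])
--   1
--   >>> cal_point({2, 4, 5, 6}, {10, 11, 7, 15}, [6, 3, 12, 12, 8, 9])
--   1
--   >>> cal_point({10, 6}, {8, 13}, [11, 6, 12, 3, 5, 9, 6, 12, 4, 5, 2, 7, 7])
--   2
--   >>> cal_point({11, 3, 5}, {10, 12, 15}, [9, 7, 3, 11, 3, 8, 3, 8])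
--   4
--
--   """
--   # YOUR CODE HERE
--   score = 0
--   for i in int_list:
--     if i in y_set:
--       score += 1
--     if i in p_set:
--       score -= 1
--   return score
-- ===== SOURCE B (Python) =====
-- def cal_point(y_set, p_set, int_list):
--   counts = {}
--   for i in int_list:
--     counts[i] = counts.get(i, 0) + 1
--   return sum(counts.get(x, 0) for x in y_set) - sum(counts.get(x, 0) for x in p_set)
-- ===== Notes on version B (the rewrite author's own statement) =====
-- stated objective: alternative
-- what changed: B builds a frequency table of int_list once, then scores by summing counts over the two query sets instead of scanning the list and probing the sets per element.
import Mathlib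
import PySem

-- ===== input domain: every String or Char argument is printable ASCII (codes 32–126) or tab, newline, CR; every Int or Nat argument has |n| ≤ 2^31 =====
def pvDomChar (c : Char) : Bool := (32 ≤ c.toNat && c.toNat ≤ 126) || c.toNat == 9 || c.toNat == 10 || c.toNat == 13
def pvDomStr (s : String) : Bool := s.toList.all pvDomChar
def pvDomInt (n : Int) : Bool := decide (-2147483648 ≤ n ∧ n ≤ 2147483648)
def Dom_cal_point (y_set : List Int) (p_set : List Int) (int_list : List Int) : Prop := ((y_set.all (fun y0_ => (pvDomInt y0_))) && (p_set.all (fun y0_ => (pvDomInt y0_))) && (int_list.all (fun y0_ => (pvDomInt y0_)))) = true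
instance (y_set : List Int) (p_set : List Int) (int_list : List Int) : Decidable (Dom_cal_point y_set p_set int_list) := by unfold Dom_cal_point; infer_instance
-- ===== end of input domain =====

-- B scores by summing a prebuilt frequency table of int_list over the two query sets
-- instead of scanning the list and probing the sets per element (alternative decomposition).


-- ===== PORT A =====
def cal_point (y_set : List Int) (p_set : List Int) (int_list : List Int) : Int :=
  int_list.foldl (fun score i =>
    let score := if y_set.contains i then score + 1 else score
    if p_set.contains i then score - 1 else score) 0

-- ===== PORT B =====
def cal_point_alt (y_set : List Int) (p_set : List Int) (int_list : List Int) : Int :=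
  let counts := int_list.foldl (fun d i => d.insert i (d.getD i 0 + 1)) PySem.Dict.empty
  (y_set.foldl (fun s x => s + counts.getD x 0) 0)
    - (p_set.foldl (fun s x => s + counts.getD x 0) 0)

-- ===== PRECONDITION & SPEC =====
-- y_set and p_set are Python SETS: by the type convention their List Int encodings hold
-- distinct elements; Pre_ states exactly that (no real Python input is excluded).
def Pre_cal_point (y_set : List Int) (p_set : List Int) (int_list : List Int) : Prop :=
  y_set.Nodup ∧ p_set.Nodup
instance (y_set : List Int) (p_set : List Int) (int_list : List Int) : Decidable (Pre_cal_point y_set p_set int_list) := by unfold Pre_cal_point; infer_instance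
def pvWitness_cal_point : List Int × List Int × List Int := ([1, 2, 3], [4, 5, 6], [1, 2, 3, 4, 5])

def Spec_cal_point (y_set : List Int) (p_set : List Int) (int_list : List Int) (out : Int) : Prop := out = cal_point_alt y_set p_set int_list
instance (y_set : List Int) (p_set : List Int) (int_list : List Int) (out : Int) : Decidable (Spec_cal_point y_set p_set int_list out) := by unfold Spec_cal_point; infer_instance

-- ===== CLAIM (what is proved, stated in full; the proofs are below) =====
def Claim_equal_cal_point : Prop := ∀ (y_set : List Int) (p_set : List Int) (int_list : List Int), Dom_cal_point y_set p_set int_list → Pre_cal_point y_set p_set int_list → Spec_cal_point y_set p_set int_list (cal_point y_set p_set int_list)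

-- ===== LEMMAS AND PROOFS =====

-- A's loop, with a generalized accumulator, is the sum of per-element indicator terms.
theorem calA_fold (y p : List Int) (l : List Int) (s : Int) :
    l.foldl (fun score i =>
      let score := if y.contains i then score + 1 else score
      if p.contains i then score - 1 else score) s
    = s + (l.map (fun i => (if y.contains i then (1:Int) else 0) - (if p.contains i then (1:Int) else 0))).sum := by
  induction l generalizing s with
  | nil => simp
  | cons a l ih =>
    simp only [List.foldl_cons, List.map_cons, List.sum_cons, ih]
    split_ifs <;> ring

-- summing a function with a generalized accumulator
theorem foldl_add_map (g : Int → Int) (xs : List Int) (s : Int) :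
    xs.foldl (fun acc x => acc + g x) s = s + (xs.map g).sum := by
  induction xs generalizing s with
  | nil => simp
  | cons a xs ih => simp [ih]; ring

theorem sum_indicator_zero (a : Int) (y : List Int) (h : a ∉ y) :
    (y.map (fun x => if a = x then (1:Int) else 0)).sum = 0 := by
  induction y with
  | nil => simp
  | cons b y ih =>
    simp only [List.mem_cons, not_or] at h
    simp [h.1, ih h.2]

theorem sum_indicator (a : Int) (y : List Int) (hy : y.Nodup) :
    (y.map (fun x => if a = x then (1:Int) else 0)).sum
      = if y.contains a then 1 else 0 := by
  induction y with
  | nil => simp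
  | cons b y ih =>
    rcases List.nodup_cons.mp hy with ⟨hb, hy'⟩
    by_cases hab : a = b
    · subst hab
      simp [sum_indicator_zero a y hb]
    · simp [hab, ih hy']

-- summing counts of int_list over a duplicate-free query set = counting list elements in the set
theorem sum_counts (y : List Int) (hy : y.Nodup) (l : List Int) :
    (y.map (fun x => ((l.count x : Int)))).sum
      = (l.map (fun i => if y.contains i then (1:Int) else 0)).sum := by
  induction l with
  | nil => simp
  | cons a l ih =>
    have : (y.map (fun x => (((a :: l).count x : Int)))).sum
        = (y.map (fun x => (l.count x : Int))).sum
          + (y.map (fun x => if a = x then (1:Int) else 0)).sum := by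
      rw [← List.sum_map_add]
      refine congrArg List.sum (List.map_congr_left fun x _ => ?_)
      by_cases h : a = x <;> simp [List.count_cons, h] <;> push_cast <;> omega
    rw [this, ih, sum_indicator a y hy]
    simp only [List.map_cons, List.sum_cons]
    exact add_comm _ _

theorem map_sum_sub (f g : Int → Int) (l : List Int) :
    (l.map (fun i => f i - g i)).sum = (l.map f).sum - (l.map g).sum := by
  induction l with
  | nil => simp
  | cons a l ih => simp [ih]; ring

theorem cal_point_eq (y p l : List Int) (hy : y.Nodup) (hp : p.Nodup) :
    cal_point y p l = cal_point_alt y p l := by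
  unfold cal_point cal_point_alt
  rw [calA_fold]
  have hc : ∀ x : Int,
      (l.foldl (fun d i => d.insert i (d.getD i 0 + 1)) PySem.Dict.empty).getD x 0
        = (l.count x : Int) := by
    intro x
    rw [PySem.Dict.getD_foldl_insert_add_one]
    simp
  simp only [foldl_add_map]
  have hcongr : ∀ q : List Int,
      (q.map (fun x => (l.foldl (fun d i => d.insert i (d.getD i 0 + 1)) PySem.Dict.empty).getD x 0)).sum
        = (q.map (fun x => (l.count x : Int))).sum := by
    intro q
    exact congrArg List.sum (List.map_congr_left fun x _ => hc x)
  rw [hcongr y, hcongr p, sum_counts y hy l, sum_counts p hp l]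
  rw [map_sum_sub (fun i => if y.contains i then (1:Int) else 0) (fun i => if p.contains i then (1:Int) else 0) l]
  ring

-- ===== VERDICT (by name: the statement is the Claim_ definition above) =====
theorem cal_point_spec : Claim_equal_cal_point := by
  intro y p l _ hpre
  exact cal_point_eq y p l hpre.1 hpre.2
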